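-- pv_equiv track=rewrite | github.com/Karna-Balaji-07/Python_2025 | Strings/Binary_String.py | binary1
-- ===== SOURCE A (Python) =====
-- def binary1(s):
--     n = len(s)
--     arr = []
--     for i in s:
--         arr.append(i)
--     count = arr.count("1")
--     formula = (count * (count-1)) // 2
--     return formula
-- ===== SOURCE B (Python) =====
-- def binary1(s):
--     ones_seen = 0
--     total = 0
--     for ch in s:
--         if ch == "1":
--             total += ones_seen
--             ones_seen += 1
--     return total
-- ===== Notes on version B (the rewrite author's own statement) =====
-- stated objective: faster
-- what changed: Replaced the build-a-char-list + count + combination closed-form with a single incremental pass that at each matching character adds the number of matches already seen.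
import Mathlib
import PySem

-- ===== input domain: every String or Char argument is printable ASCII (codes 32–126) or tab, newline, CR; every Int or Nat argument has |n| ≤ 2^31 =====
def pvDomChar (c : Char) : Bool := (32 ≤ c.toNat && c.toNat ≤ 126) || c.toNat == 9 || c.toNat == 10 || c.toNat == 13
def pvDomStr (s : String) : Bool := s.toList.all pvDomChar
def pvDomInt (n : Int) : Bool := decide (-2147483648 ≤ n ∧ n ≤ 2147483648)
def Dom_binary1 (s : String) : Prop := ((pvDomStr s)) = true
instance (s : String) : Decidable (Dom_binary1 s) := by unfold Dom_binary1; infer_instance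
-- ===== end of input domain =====

-- B replaces the list-copy + count + C(n,2) formula with one incremental pass summing ones seen so far (alternative decomposition).


-- ===== PORT A =====
def binary1 (s : String) : Int :=
  -- n = len(s) is computed but unused in A
  let arr := s.toList.foldl (fun a i => a ++ [i]) []
  let count : Int := PySem.List.count arr '1'
  let formula := PySem.Int.floordiv (count * (count - 1)) 2
  formula

-- ===== PORT B =====
def binary1_alt (s : String) : Int :=
  (s.toList.foldl
    (fun (st : Int × Int) ch =>
      if ch = '1' then (st.1 + 1, st.2 + st.1) else st)
    (0, 0)).2

-- ===== PRECONDITION & SPEC =====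
def Spec_binary1 (s : String) (out : Int) : Prop := out = binary1_alt s
instance (s : String) (out : Int) : Decidable (Spec_binary1 s out) := by unfold Spec_binary1; infer_instance

-- ===== CLAIM (what is proved, stated in full; the proofs are below) =====
def Claim_equal_binary1 : Prop := ∀ (s : String), Dom_binary1 s → Spec_binary1 s (binary1 s)

-- ===== LEMMAS AND PROOFS =====

theorem pv_append_fold (l : List Char) :
    ∀ a : List Char, l.foldl (fun a i => a ++ [i]) a = a ++ l := by
  induction l with
  | nil => simp [List.foldl]
  | cons x xs ih => intro a; simp [List.foldl, ih]

theorem pv_fold_inv (l : List Char) : ∀ (k t : Int),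
    (l.foldl (fun (st : Int × Int) ch =>
        if ch = '1' then (st.1 + 1, st.2 + st.1) else st) (k, t))
      = (k + (l.count '1' : Int),
         t + k * (l.count '1' : Int)
           + ((l.count '1' : Int) * ((l.count '1' : Int) - 1)) / 2) := by
  induction l with
  | nil => intro k t; simp [List.foldl]
  | cons x xs ih =>
    intro k t
    by_cases hx : x = '1'
    · simp only [List.foldl, hx, if_true, ih, List.count_cons_self]
      have hc : ((xs.count '1' + 1 : Nat) : Int) = (xs.count '1' : Int) + 1 := by
        push_cast; ring
      rw [hc, Prod.mk.injEq]
      refine ⟨by ring, ?_⟩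
      set c : Int := (xs.count '1' : Int) with hcdef
      have h2 : (c + 1) * (c + 1 - 1) = c * (c - 1) + 2 * c := by ring
      rw [h2]
      have hdvd : (2 : Int) ∣ c * (c - 1) := Int.even_mul_pred_self c |>.two_dvd
      obtain ⟨m, hm⟩ := hdvd
      rw [hm]
      have : (2 * m + 2 * c) = 2 * (m + c) := by ring
      rw [this, Int.mul_ediv_cancel_left _ (by norm_num),
        Int.mul_ediv_cancel_left _ (by norm_num)]
      ring
    · simp only [List.foldl, if_neg hx, ih, List.count_cons_of_ne hx]

-- ===== VERDICT (by name: the statement is the Claim_ definition above) =====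
theorem binary1_spec : Claim_equal_binary1 := by
  intro s _
  show binary1 s = binary1_alt s
  unfold binary1 binary1_alt
  rw [pv_append_fold, List.nil_append, pv_fold_inv]
  simp only [PySem.List.count, List.count]
  set c : Int := ((s.toList.countP (· == '1')) : Int) with hc
  have hpos : (0:Int) < 2 := by norm_num
  rw [PySem.Int.floordiv_eq_ediv_of_pos hpos]
  ring_nf
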